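-- pv_equiv track=rewrite | github.com/varunreddy1268/Hacker-Rank-HackThe-Interview-Contest | Maximum_Streaks.py | getMaxStreaks
-- ===== SOURCE A (Python) =====
-- def getMaxStreaks(t):
--     # Return an array of two integers containing the maximum streak of heads and tails respectively
--     h,t1,k1,k2=[],[],0,0
--     for i in range(len(t)):
--         if t[i]=='Heads':
--             k1=k1+1
--             t1.append(k2)
--             k2=0
--         if t[i]=='Tails':
--             k2=k2+1
--             h.append(k1)
--             k1=0
--     t1.append(k2)
--     h.append(k1)
--     return (max(h),max(t1))
-- ===== SOURCE B (Python) =====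
-- def getMaxStreaks(t):
--     # Group-then-reduce: filter to coin values (A treats other strings as
--     # streak-transparent), then scan maximal runs of equal values with two indices.
--     coins = [x for x in t if x == 'Heads' or x == 'Tails']
--     max_heads = 0
--     max_tails = 0
--     i, n = 0, len(coins)
--     while i < n:
--         j = i
--         while j < n and coins[j] == coins[i]:
--             j += 1
--         if coins[i] == 'Heads':
--             max_heads = max(max_heads, j - i)
--         else:
--             max_tails = max(max_tails, j - i)
--         i = j
--     return (max_heads, max_tails)
-- ===== Notes on version B (the rewrite author's own statement) =====
-- stated objective: alternative
-- what changed: Replaces A's append-a-counter-on-every-flip list accumulation (plus a final max over those lists) with a filter-to-coins pass followed by a two-pointer scan over maximal runs that keeps only two running maxima.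
import Mathlib
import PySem

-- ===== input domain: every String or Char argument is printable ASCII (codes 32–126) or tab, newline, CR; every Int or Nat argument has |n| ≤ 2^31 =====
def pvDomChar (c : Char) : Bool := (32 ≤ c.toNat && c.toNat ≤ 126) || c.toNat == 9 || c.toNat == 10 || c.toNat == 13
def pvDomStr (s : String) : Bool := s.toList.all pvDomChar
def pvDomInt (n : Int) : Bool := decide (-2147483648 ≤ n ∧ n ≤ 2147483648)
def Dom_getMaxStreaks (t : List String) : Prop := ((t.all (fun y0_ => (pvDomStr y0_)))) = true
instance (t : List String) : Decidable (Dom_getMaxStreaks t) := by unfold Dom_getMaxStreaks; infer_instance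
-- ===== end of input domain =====

-- B replaces A's append-a-counter-on-every-flip list accumulation with a
-- filter-to-coins pass followed by a run-by-run scan keeping two running maxima
-- (alternative decomposition, same asymptotic cost).

-- ===== PORT A =====
-- one iteration of A's loop body on state (h, t1, k1, k2)
def stepA (st : List Int × List Int × Int × Int) (x : String) :
    List Int × List Int × Int × Int :=
  let st := if x == "Heads" then (st.1, st.2.1 ++ [st.2.2.2], st.2.2.1 + 1, 0) else st
  if x == "Tails" then (st.1 ++ [st.2.2.1], st.2.1, 0, st.2.2.2 + 1) else st

def getMaxStreaks (t : List String) : Int × Int :=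
  -- for i in range(len(t)): ... reads t[i]
  let s := (PySem.List.pyRange 0 (PySem.List.len t) 1).foldl
    (fun st i => stepA st (PySem.List.pyGetD t i "")) ([], [], 0, 0)
  let h := s.1 ++ [s.2.2.1]       -- h.append(k1)
  let t1 := s.2.1 ++ [s.2.2.2]    -- t1.append(k2)
  -- max(h), max(t1): both lists end in an appended element so they are nonempty and getD 0 is unreachable
  ((PySem.List.max? h (fun y => y)).getD 0, (PySem.List.max? t1 (fun y => y)).getD 0)

-- ===== PORT B =====
-- the outer while loop of Source B: consume one maximal run per step
-- (the inner 'while coins[j] == coins[i]' is the takeWhile/dropWhile split of the tail)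
def altGo : Int × Int → List String → Int × Int
  | mm, [] => mm
  | mm, x :: xs =>
      let pre := xs.takeWhile (fun y => y == x)
      let rest := xs.dropWhile (fun y => y == x)
      let len : Int := (pre.length : Int) + 1
      altGo (if x == "Heads" then (max mm.1 len, mm.2) else (mm.1, max mm.2 len)) rest
termination_by _ c => c.length
decreasing_by
  simp only [List.length_cons]
  exact Nat.lt_succ_of_le (List.length_dropWhile_le _ _)

def getMaxStreaks_alt (t : List String) : Int × Int :=
  altGo (0, 0) (t.filter (fun x => x == "Heads" || x == "Tails"))

-- ===== PRECONDITION & SPEC =====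
def Spec_getMaxStreaks (t : List String) (out : Int × Int) : Prop := out = getMaxStreaks_alt t
instance (t : List String) (out : Int × Int) : Decidable (Spec_getMaxStreaks t out) := by unfold Spec_getMaxStreaks; infer_instance

-- ===== CLAIM (what is proved, stated in full; the proofs are below) =====
def Claim_equal_getMaxStreaks : Prop := ∀ (t : List String), Dom_getMaxStreaks t → Spec_getMaxStreaks t (getMaxStreaks t)

-- ===== LEMMAS AND PROOFS =====

-- specification-side recursions: best streak of Heads / Tails with pending counter k
def bestH : Int → List String → Int
  | k, [] => k
  | k, x :: xs => if x = "Heads" then bestH (k + 1) xs else max k (bestH 0 xs)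

def bestT : Int → List String → Int
  | k, [] => k
  | k, x :: xs => if x = "Tails" then bestT (k + 1) xs else max k (bestT 0 xs)

theorem le_bestH (k : Int) (l : List String) : k ≤ bestH k l := by
  induction l generalizing k with
  | nil => simp [bestH]
  | cons x xs ih =>
    simp only [bestH]
    split
    · exact le_trans (by omega) (ih (k + 1))
    · exact le_max_left _ _

theorem le_bestT (k : Int) (l : List String) : k ≤ bestT k l := by
  induction l generalizing k with
  | nil => simp [bestT]
  | cons x xs ih =>
    simp only [bestT]
    split
    · exact le_trans (by omega) (ih (k + 1))
    · exact le_max_left _ _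

theorem foldl_max_max (l : List Int) (a b : Int) :
    l.foldl max (max a b) = max a (l.foldl max b) := by
  induction l generalizing b with
  | nil => simp
  | cons c t ih => simp only [List.foldl_cons, max_assoc, ih]

theorem max?_append_singleton (l : List Int) (a : Int) :
    PySem.List.max? (l ++ [a]) (fun y => y) = some (l.foldl max a) := by
  cases l with
  | nil => simp [PySem.List.max?]
  | cons x r =>
    rw [List.cons_append, PySem.List.max?_id_cons]
    simp only [List.foldl_append, List.foldl_cons, List.foldl_nil]
    rw [foldl_max_max]
    exact congrArg some (max_comm _ _)

-- A's loop ignores every non-coin element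
theorem stepA_non_coin (st : List Int × List Int × Int × Int) (x : String)
    (hx : ¬ x = "Heads") (hx' : ¬ x = "Tails") : stepA st x = st := by
  simp [stepA, hx, hx']

theorem foldl_stepA_filter (t : List String) (st : List Int × List Int × Int × Int) :
    t.foldl stepA st = (t.filter (fun x => x == "Heads" || x == "Tails")).foldl stepA st := by
  induction t generalizing st with
  | nil => rfl
  | cons x xs ih =>
    by_cases h1 : x = "Heads"
    · simp [h1, ih]
    · by_cases h2 : x = "Tails"
      · simp [h2, ih]
      · rw [List.foldl_cons, stepA_non_coin st x h1 h2]
        have hb : ((x == "Heads" || x == "Tails") : Bool) = false := by simp [h1, h2]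
        rw [List.filter_cons, hb]
        · exact ih st

-- invariant of A's fold over a coin-only list: the running max of the appended
-- snapshots together with the pending counter is bestH/bestT
theorem foldl_stepA_best (c : List String)
    (hc : ∀ x ∈ c, x = "Heads" ∨ x = "Tails")
    (h t1 : List Int) (k1 k2 : Int) :
    ((c.foldl stepA (h, t1, k1, k2)).1.foldl max (c.foldl stepA (h, t1, k1, k2)).2.2.1
        = h.foldl max (bestH k1 c)) ∧
    ((c.foldl stepA (h, t1, k1, k2)).2.1.foldl max (c.foldl stepA (h, t1, k1, k2)).2.2.2
        = t1.foldl max (bestT k2 c)) := by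
  induction c generalizing h t1 k1 k2 with
  | nil => simp [bestH, bestT]
  | cons x xs ih =>
    rcases hc x (by simp) with hx | hx
    · subst hx
      have hstep : stepA (h, t1, k1, k2) "Heads" = (h, t1 ++ [k2], k1 + 1, 0) := by
        simp [stepA]
      have ih' := ih (fun y hy => hc y (by simp [hy])) h (t1 ++ [k2]) (k1 + 1) 0
      simp only [List.foldl_cons, hstep]
      refine ⟨by rw [ih'.1]; simp [bestH], ?_⟩
      rw [ih'.2, List.foldl_append, List.foldl_cons, List.foldl_nil]
      simp only [bestT, if_neg (by decide : ¬ ("Heads" : String) = "Tails")]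
      rw [foldl_max_max]
      exact max_comm _ _
    · subst hx
      have hstep : stepA (h, t1, k1, k2) "Tails" = (h ++ [k1], t1, 0, k2 + 1) := by
        simp [stepA]
      have ih' := ih (fun y hy => hc y (by simp [hy])) (h ++ [k1]) t1 0 (k2 + 1)
      simp only [List.foldl_cons, hstep]
      refine ⟨?_, by rw [ih'.2]; simp [bestT]⟩
      rw [ih'.1, List.foldl_append, List.foldl_cons, List.foldl_nil]
      simp only [bestH, if_neg (by decide : ¬ ("Tails" : String) = "Heads")]
      rw [foldl_max_max]
      exact max_comm _ _

theorem dropWhile_head_not {α : Type} (p : α → Bool) (l : List α) :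
    ∀ y l', l.dropWhile p = y :: l' → p y = false := by
  induction l with
  | nil => intro y l' h; simp [List.dropWhile] at h
  | cons a t ih =>
    intro y l' h
    rw [List.dropWhile_cons] at h
    split at h
    · exact ih y l' h
    · cases h; simpa using ‹¬ p a = true›

theorem bestH_heads_run (pre : List String) (hp : ∀ y ∈ pre, y = "Heads")
    (k : Int) (l : List String) : bestH k (pre ++ l) = bestH (k + pre.length) l := by
  induction pre generalizing k with
  | nil => simp
  | cons y rest ih =>
    have hy := hp y (by simp)
    subst hy
    rw [List.cons_append]
    simp only [bestH]
    rw [ih (fun z hz => hp z (by simp [hz])) (k + 1)]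
    exact congrArg (fun m => bestH m l) (by push_cast [List.length_cons]; ring)

theorem bestT_heads_run (pre : List String) (hp : ∀ y ∈ pre, y = "Heads")
    (l : List String) : bestT 0 (pre ++ l) = bestT 0 l := by
  induction pre with
  | nil => simp
  | cons y rest ih =>
    have hy := hp y (by simp)
    subst hy
    rw [List.cons_append]
    simp only [bestT, if_neg (by decide : ¬ ("Heads" : String) = "Tails")]
    rw [ih (fun z hz => hp z (by simp [hz])), max_eq_right (le_bestT 0 _)]

theorem bestT_tails_run (pre : List String) (hp : ∀ y ∈ pre, y = "Tails")
    (k : Int) (l : List String) : bestT k (pre ++ l) = bestT (k + pre.length) l := by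
  induction pre generalizing k with
  | nil => simp
  | cons y rest ih =>
    have hy := hp y (by simp)
    subst hy
    rw [List.cons_append]
    simp only [bestT]
    rw [ih (fun z hz => hp z (by simp [hz])) (k + 1)]
    exact congrArg (fun m => bestT m l) (by push_cast [List.length_cons]; ring)

theorem bestH_tails_run (pre : List String) (hp : ∀ y ∈ pre, y = "Tails")
    (l : List String) : bestH 0 (pre ++ l) = bestH 0 l := by
  induction pre with
  | nil => simp
  | cons y rest ih =>
    have hy := hp y (by simp)
    subst hy
    rw [List.cons_append]
    simp only [bestH, if_neg (by decide : ¬ ("Tails" : String) = "Heads")]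
    rw [ih (fun z hz => hp z (by simp [hz])), max_eq_right (le_bestH 0 _)]

theorem bestH_not_head (k : Int) (hk : 0 ≤ k) (rest : List String)
    (hr : ∀ y l', rest = y :: l' → ¬ y = "Heads") :
    bestH k rest = max k (bestH 0 rest) := by
  cases rest with
  | nil => simp [bestH, max_eq_left hk]
  | cons y l' =>
    have hy := hr y l' rfl
    simp only [bestH, if_neg hy]
    rw [max_eq_right (le_bestH 0 l')]

theorem bestT_not_head (k : Int) (hk : 0 ≤ k) (rest : List String)
    (hr : ∀ y l', rest = y :: l' → ¬ y = "Tails") :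
    bestT k rest = max k (bestT 0 rest) := by
  cases rest with
  | nil => simp [bestT, max_eq_left hk]
  | cons y l' =>
    have hy := hr y l' rfl
    simp only [bestT, if_neg hy]
    rw [max_eq_right (le_bestT 0 l')]

-- B's run-by-run scan over a coin-only list computes the two maxima
theorem altGo_best (n : ℕ) (c : List String) (hn : c.length ≤ n)
    (hc : ∀ x ∈ c, x = "Heads" ∨ x = "Tails")
    (mh mt : Int) (hmh : 0 ≤ mh) (hmt : 0 ≤ mt) :
    altGo (mh, mt) c = (max mh (bestH 0 c), max mt (bestT 0 c)) := by
  induction n generalizing c mh mt with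
  | zero =>
    have : c = [] := List.length_eq_zero_iff.mp (Nat.le_zero.mp hn)
    subst this
    simp [altGo, bestH, bestT, max_eq_left hmh, max_eq_left hmt]
  | succ n ihn =>
    cases c with
    | nil => simp [altGo, bestH, bestT, max_eq_left hmh, max_eq_left hmt]
    | cons x xs =>
      rw [altGo]
      set pre := xs.takeWhile (fun y => y == x) with hpre_def
      set rest := xs.dropWhile (fun y => y == x) with hrest_def
      have hsplit : pre ++ rest = xs := List.takeWhile_append_dropWhile
      have hpre : ∀ y ∈ pre, y = x := by
        intro y hy
        have := List.mem_takeWhile_imp hy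
        simpa using this
      have hrest_len : rest.length ≤ n := by
        have h1 : rest.length ≤ xs.length := List.length_dropWhile_le _ _
        have h2 : xs.length ≤ n := by simpa using Nat.succ_le_succ_iff.mp (by simpa using hn)
        omega
      have hcrest : ∀ y ∈ rest, y = "Heads" ∨ y = "Tails" := by
        intro y hy
        exact hc y (by
          have : y ∈ xs := (List.dropWhile_sublist _).mem hy
          simp [this])
      have hrest_head : ∀ y l', rest = y :: l' → ¬ y = x := by
        intro y l' h
        have := dropWhile_head_not (fun y => y == x) xs y l' (hrest_def ▸ h)
        simpa using this
      have hlen_pos : (0 : Int) ≤ (pre.length : Int) + 1 := by positivity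
      rcases hc x (by simp) with hx | hx
      · subst hx
        rw [if_pos (by decide)]
        rw [ihn rest hrest_len hcrest _ _ (le_trans hmh (le_max_left _ _)) hmt]
        have h1 : bestH 0 ("Heads" :: xs) = max ((pre.length : Int) + 1) (bestH 0 rest) := by
          have : bestH 0 ("Heads" :: xs) = bestH 1 xs := by
            simp [bestH]
          rw [this, ← hsplit, bestH_heads_run pre (fun y hy => hpre y hy) 1 rest,
            bestH_not_head _ (by positivity) rest hrest_head,
            show (1 : Int) + (pre.length : Int) = (pre.length : Int) + 1 from by ring]
        have h2 : bestT 0 ("Heads" :: xs) = bestT 0 rest := by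
          have : ("Heads" :: xs) = ("Heads" :: pre) ++ rest := by
            rw [← hsplit]; rfl
          rw [this, bestT_heads_run ("Heads" :: pre)
            (fun y hy => (List.mem_cons.mp hy).elim id (hpre y)) rest]
        rw [h1, h2, ← max_assoc]
      · subst hx
        rw [if_neg (by decide)]
        rw [ihn rest hrest_len hcrest _ _ hmh (le_trans hmt (le_max_left _ _))]
        have h1 : bestT 0 ("Tails" :: xs) = max ((pre.length : Int) + 1) (bestT 0 rest) := by
          have : bestT 0 ("Tails" :: xs) = bestT 1 xs := by
            simp [bestT]
          rw [this, ← hsplit, bestT_tails_run pre (fun y hy => hpre y hy) 1 rest,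
            bestT_not_head _ (by positivity) rest hrest_head,
            show (1 : Int) + (pre.length : Int) = (pre.length : Int) + 1 from by ring]
        have h2 : bestH 0 ("Tails" :: xs) = bestH 0 rest := by
          have : ("Tails" :: xs) = ("Tails" :: pre) ++ rest := by
            rw [← hsplit]; rfl
          rw [this, bestH_tails_run ("Tails" :: pre)
            (fun y hy => (List.mem_cons.mp hy).elim id (hpre y)) rest]
        rw [h1, h2, ← max_assoc]

-- ===== VERDICT (by name: the statement is the Claim_ definition above) =====
theorem getMaxStreaks_spec : Claim_equal_getMaxStreaks := by
  intro t _
  unfold Spec_getMaxStreaks getMaxStreaks getMaxStreaks_alt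
  rw [PySem.List.foldl_pyRange_zero_pyGetD t "" stepA ([], [], 0, 0)]
  rw [foldl_stepA_filter]
  set c := t.filter (fun x => x == "Heads" || x == "Tails") with hc_def
  have hc : ∀ x ∈ c, x = "Heads" ∨ x = "Tails" := by
    intro x hx
    have := (List.mem_filter.mp hx).2
    rcases Bool.or_eq_true_iff.mp this with h | h
    · exact Or.inl (by simpa using h)
    · exact Or.inr (by simpa using h)
  have hA := foldl_stepA_best c hc [] [] 0 0
  rw [altGo_best c.length c le_rfl hc 0 0 le_rfl le_rfl]
  simp only [max?_append_singleton]
  rw [hA.1, hA.2]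
  simp [max_eq_right (le_bestH 0 c), max_eq_right (le_bestT 0 c)]
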